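-- pv_equiv track=rewrite | github.com/MortenBeck/guess-the-worth | backend/services/auth_service.py | extract_primary_role
-- ===== SOURCE A (Python) =====
-- def extract_primary_role(auth0_roles: list[str]) -> str:
--     """Extract primary role from Auth0 roles list.
--
--     Returns the highest priority role: ADMIN > SELLER > BUYER
--     """
--     if not auth0_roles:
--         return "BUYER"
--
--     # Convert to uppercase for comparison
--     roles_upper = [role.upper() for role in auth0_roles]
--
--     if "ADMIN" in roles_upper:
--         return "ADMIN"
--     elif "SELLER" in roles_upper:
--         return "SELLER"
--     else:
--         return "BUYER"
-- ===== SOURCE B (Python) =====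
-- def extract_primary_role(auth0_roles: list[str]) -> str:
--     """Single pass: track the max priority seen (BUYER baseline), then map back."""
--     priority = {"ADMIN": 3, "SELLER": 2, "BUYER": 1}
--     best = 1
--     for role in auth0_roles:
--         p = priority.get(role.upper(), 0)
--         if p > best:
--             best = p
--     return {3: "ADMIN", 2: "SELLER"}.get(best, "BUYER")
-- ===== Notes on version B (the rewrite author's own statement) =====
-- stated objective: alternative
-- what changed: Replaces the build-uppercase-list-then-two-membership-scans approach with a single fold that tracks the maximum role priority via a priority dict, mapping the best priority back to its name at the end.
import Mathlib
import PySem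

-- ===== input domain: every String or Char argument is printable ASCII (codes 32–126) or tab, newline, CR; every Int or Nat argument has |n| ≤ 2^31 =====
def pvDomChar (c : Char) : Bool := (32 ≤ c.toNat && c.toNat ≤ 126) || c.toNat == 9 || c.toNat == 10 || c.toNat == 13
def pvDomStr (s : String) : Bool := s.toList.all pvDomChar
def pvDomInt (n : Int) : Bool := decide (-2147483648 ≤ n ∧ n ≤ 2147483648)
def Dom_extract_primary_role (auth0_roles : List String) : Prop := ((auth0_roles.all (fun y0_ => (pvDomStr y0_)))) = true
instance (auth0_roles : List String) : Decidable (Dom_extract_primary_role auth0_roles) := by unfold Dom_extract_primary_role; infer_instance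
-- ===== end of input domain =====

-- B replaces A's uppercase-list-plus-two-membership-scans with one fold tracking the max role priority (objective: alternative decomposition, same cost).

-- ===== PORT A =====
def extract_primary_role (auth0_roles : List String) : String :=
  if auth0_roles = [] then "BUYER"
  else
    let roles_upper := auth0_roles.map PySem.Str.upper
    if "ADMIN" ∈ roles_upper then "ADMIN"
    else if "SELLER" ∈ roles_upper then "SELLER"
    else "BUYER"

-- ===== PORT B =====
def extract_primary_role_alt (auth0_roles : List String) : String :=
  let priority : PySem.Dict String Int :=
    PySem.Dict.ofList [("ADMIN", 3), ("SELLER", 2), ("BUYER", 1)]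
  let best := auth0_roles.foldl (fun best role =>
    let p := priority.getD (PySem.Str.upper role) 0
    if p > best then p else best) 1
  (PySem.Dict.ofList [((3 : Int), "ADMIN"), (2, "SELLER")]).getD best "BUYER"

-- ===== PRECONDITION & SPEC =====
def Spec_extract_primary_role (auth0_roles : List String) (out : String) : Prop := out = extract_primary_role_alt auth0_roles
instance (auth0_roles : List String) (out : String) : Decidable (Spec_extract_primary_role auth0_roles out) := by unfold Spec_extract_primary_role; infer_instance

-- ===== CLAIM (what is proved, stated in full; the proofs are below) =====
def Claim_equal_extract_primary_role : Prop := ∀ (auth0_roles : List String), Dom_extract_primary_role auth0_roles → Spec_extract_primary_role auth0_roles (extract_primary_role auth0_roles)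

-- ===== LEMMAS AND PROOFS =====

def pvPrio (r : String) : Int :=
  (PySem.Dict.ofList [("ADMIN", (3:Int)), ("SELLER", 2), ("BUYER", 1)]).getD (PySem.Str.upper r) 0

def pvBest (xs : List String) : Int :=
  if "ADMIN" ∈ xs.map PySem.Str.upper then 3
  else if "SELLER" ∈ xs.map PySem.Str.upper then 2
  else 1

lemma pvGetD_eq (u : String) :
    (PySem.Dict.ofList [("ADMIN", (3:Int)), ("SELLER", 2), ("BUYER", 1)]).getD u 0 =
      if "ADMIN" = u then 3 else if "SELLER" = u then 2 else if "BUYER" = u then 1 else 0 := by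
  have h : PySem.Dict.ofList [("ADMIN", (3:Int)), ("SELLER", 2), ("BUYER", 1)] =
      PySem.Dict.mk [("ADMIN", 3), ("SELLER", 2), ("BUYER", 1)] := by decide
  rw [h]
  simp only [PySem.Dict.getD, PySem.Dict.get?]
  split_ifs with h1 h2 h3
  · subst h1; decide
  · subst h2; decide
  · subst h3; decide
  · have b1 : ("ADMIN" == u) = false := beq_eq_false_iff_ne.mpr h1
    have b2 : ("SELLER" == u) = false := beq_eq_false_iff_ne.mpr h2
    have b3 : ("BUYER" == u) = false := beq_eq_false_iff_ne.mpr h3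
    simp [List.find?, b1, b2, b3]

lemma pvBest_cons_aux (x : String) (xs : List String) (p : Int)
    (hp : p = if "ADMIN" = PySem.Str.upper x then 3
      else if "SELLER" = PySem.Str.upper x then 2
      else if "BUYER" = PySem.Str.upper x then 1 else 0) :
    pvBest (x :: xs) = max p (pvBest xs) := by
  subst hp
  unfold pvBest
  simp only [List.map_cons, List.mem_cons]
  by_cases hA : "ADMIN" = PySem.Str.upper x <;>
    by_cases hS : "SELLER" = PySem.Str.upper x <;>
      by_cases hB : "BUYER" = PySem.Str.upper x <;>
        by_cases hMA : "ADMIN" ∈ List.map PySem.Str.upper xs <;>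
          by_cases hMS : "SELLER" ∈ List.map PySem.Str.upper xs <;>
            simp only [hA, hS, hB, hMA, hMS, if_pos, if_neg, true_or, or_true, or_false,
              not_false_eq_true] <;>
              first | decide | (rw [eq_comm, max_eq_left]; split_ifs <;> omega)

lemma pvBest_cons (x : String) (xs : List String) :
    pvBest (x :: xs) = max (pvPrio x) (pvBest xs) :=
  pvBest_cons_aux x xs _ (pvGetD_eq _)

lemma pvFold_eq (xs : List String) (b : Int) (hb : 1 ≤ b) :
    xs.foldl (fun best role => if pvPrio role > best then pvPrio role else best) b
      = max b (pvBest xs) := by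
  induction xs generalizing b with
  | nil =>
    simp [pvBest]
    omega
  | cons x xs ih =>
    have hstep : (if pvPrio x > b then pvPrio x else b) = max b (pvPrio x) := by
      rw [max_def]; split_ifs <;> omega
    have hpos : 1 ≤ max b (pvPrio x) := le_trans hb (le_max_left _ _)
    rw [List.foldl_cons, hstep, ih _ hpos, pvBest_cons, max_assoc]

-- ===== VERDICT (by name: the statement is the Claim_ definition above) =====
theorem extract_primary_role_spec : Claim_equal_extract_primary_role := by
  intro xs _
  show extract_primary_role xs = extract_primary_role_alt xs
  have hfold :
      xs.foldl (fun best role =>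
        if (PySem.Dict.ofList [("ADMIN", (3:Int)), ("SELLER", 2), ("BUYER", 1)]).getD (PySem.Str.upper role) 0 > best
        then (PySem.Dict.ofList [("ADMIN", (3:Int)), ("SELLER", 2), ("BUYER", 1)]).getD (PySem.Str.upper role) 0
        else best) 1 = max 1 (pvBest xs) := pvFold_eq xs 1 le_rfl
  unfold extract_primary_role extract_primary_role_alt
  simp only [hfold]
  rcases eq_or_ne xs [] with h | h
  · subst h; simp [pvBest]; decide
  · simp only [if_neg h, pvBest]
    split_ifs <;> decide
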